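-- pv_equiv track=rewrite | github.com/BakhtawarAbdalla/AgaCKNER-Dataset-Management | dataset-preprocessing/dataset_preprocessing.py | convert_numbers_to_kurdish
-- ===== SOURCE A (Python) =====
-- def convert_numbers_to_kurdish(text: str) -> str:
--     number_map = {
--         '0': '٠', '1': '١', '2': '٢', '3': '٣', '4': '٤',
--         '5': '٥', '6': '٦', '7': '٧', '8': '٨', '9': '٩'
--     }
--     for eng, kurd in number_map.items():
--         text = text.replace(eng, kurd)
--     return text
-- ===== SOURCE B (Python) =====
-- def convert_numbers_to_kurdish(text: str) -> str:
--     number_map = {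
--         '0': '٠', '1': '١', '2': '٢', '3': '٣', '4': '٤',
--         '5': '٥', '6': '٦', '7': '٧', '8': '٨', '9': '٩'
--     }
--     return ''.join(number_map.get(ch, ch) for ch in text)
-- ===== Notes on version B (the rewrite author's own statement) =====
-- stated objective: idiomatic
-- what changed: Replaces ten sequential full-string str.replace scans with one left-to-right pass that joins a per-character dict lookup; since every Kurdish digit glyph is outside the ASCII digit set, no replacement can feed another, so the single pass yields the identical string.
import Mathlib
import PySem

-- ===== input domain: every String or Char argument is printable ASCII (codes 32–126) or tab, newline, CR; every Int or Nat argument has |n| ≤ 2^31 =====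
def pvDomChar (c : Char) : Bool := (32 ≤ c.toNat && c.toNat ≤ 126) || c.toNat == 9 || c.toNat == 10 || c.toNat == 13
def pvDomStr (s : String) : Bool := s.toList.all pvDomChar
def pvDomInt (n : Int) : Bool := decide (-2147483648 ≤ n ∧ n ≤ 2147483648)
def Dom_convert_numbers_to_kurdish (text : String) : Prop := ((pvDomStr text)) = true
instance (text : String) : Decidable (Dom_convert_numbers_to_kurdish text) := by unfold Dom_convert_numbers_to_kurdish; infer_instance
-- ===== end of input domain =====

-- B replaces A's ten sequential full-string replace passes by a single pass with a
-- per-character table lookup (idiomatic); return values proved identical.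

-- ===== PORT A =====
-- A's dict of 1-char string keys/values, iterated in insertion order by the for-loop.
def pvAMap : PySem.Dict String String := PySem.Dict.ofList
  [("0", "٠"), ("1", "١"), ("2", "٢"), ("3", "٣"), ("4", "٤"),
   ("5", "٥"), ("6", "٦"), ("7", "٧"), ("8", "٨"), ("9", "٩")]

def convert_numbers_to_kurdish (text : String) : String :=
  pvAMap.items.foldl (fun t p => PySem.Str.replace t p.1 p.2) text

-- ===== PORT B =====
-- B's dict; iterating a Python str yields 1-char strings, ported as Char keys/values.
def pvBMap : PySem.Dict Char Char := PySem.Dict.ofList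
  [('0', '٠'), ('1', '١'), ('2', '٢'), ('3', '٣'), ('4', '٤'),
   ('5', '٥'), ('6', '٦'), ('7', '٧'), ('8', '٨'), ('9', '٩')]

def convert_numbers_to_kurdish_alt (text : String) : String :=
  String.ofList (text.toList.map (fun ch => pvBMap.getD ch ch))

-- ===== PRECONDITION & SPEC =====
def Spec_convert_numbers_to_kurdish (text : String) (out : String) : Prop := out = convert_numbers_to_kurdish_alt text
instance (text : String) (out : String) : Decidable (Spec_convert_numbers_to_kurdish text out) := by unfold Spec_convert_numbers_to_kurdish; infer_instance

-- ===== CLAIM (what is proved, stated in full; the proofs are below) =====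
def Claim_equal_convert_numbers_to_kurdish : Prop := ∀ (text : String), Dom_convert_numbers_to_kurdish text → Spec_convert_numbers_to_kurdish text (convert_numbers_to_kurdish text)

-- ===== LEMMAS AND PROOFS =====

-- replacing a single char [c] by [k] is a per-character map
theorem repl_go_single (c k : Char) : ∀ (fuel : Nat) (l acc : List Char), l.length ≤ fuel →
    PySem.Chars.replace.go [c] [k] fuel l acc
      = acc.reverse ++ l.map (fun x => if x = c then k else x) := by
  intro fuel
  induction fuel with
  | zero =>
    intro l acc h
    have : l = [] := List.eq_nil_of_length_eq_zero (Nat.le_zero.mp h)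
    subst this
    simp [PySem.Chars.replace.go]
  | succ n ih =>
    intro l acc h
    cases l with
    | nil => simp [PySem.Chars.replace.go]
    | cons c' t =>
      by_cases hc : c' = c
      · subst hc
        have hp : List.isPrefixOf [c'] (c' :: t) = true := by simp [List.isPrefixOf]
        simp only [PySem.Chars.replace.go, hp, if_pos, List.length_cons,
          List.drop_succ_cons, List.length_nil, List.drop_zero]
        rw [ih t _ (Nat.le_of_succ_le_succ h)]
        simp
      · have hp : List.isPrefixOf [c] (c' :: t) = false := by
          simp [List.isPrefixOf]; exact fun hh => (hc hh.symm).elim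
        simp only [PySem.Chars.replace.go, hp]
        rw [ih t _ (Nat.le_of_succ_le_succ h)]
        simp [hc]

theorem repl_single (c k : Char) (s : List Char) :
    PySem.Chars.replace s [c] [k] = s.map (fun x => if x = c then k else x) := by
  unfold PySem.Chars.replace
  simp only [List.isEmpty_cons, Bool.false_eq_true, if_false]
  exact repl_go_single c k s.length s [] le_rfl

-- a single-char replace applied to an explicitly built string
theorem step_single (c k : Char) (old new : String) (h1 : old.toList = [c]) (h2 : new.toList = [k]) (l : List Char) :
    PySem.Str.replace (String.ofList l) old new
      = String.ofList (l.map (fun x => if x = c then k else x)) := by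
  unfold PySem.Str.replace
  rw [String.toList_ofList, h1, h2, repl_single]

-- lookup in an association list with identity default (proof helper for the invariant)
def pvLookup (ps : List (Char × Char)) (c : Char) : Char :=
  (Option.map (fun p => p.2) (List.find? (fun p => p.1 == c) ps)).getD c

-- appending one replacement pair to the lookup table, provided no stored value equals the new key
theorem pvStep (ps : List (Char × Char)) (d k : Char) (h : ∀ p ∈ ps, p.2 ≠ d) (x : Char) :
    (if pvLookup ps x = d then k else pvLookup ps x) = pvLookup (ps ++ [(d, k)]) x := by
  unfold pvLookup
  rcases hf : List.find? (fun p => p.1 == x) ps with _ | p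
  · rw [List.find?_append, hf]
    by_cases hx : x = d
    · subst hx; simp
    · have hdx : (d == x) = false := beq_eq_false_iff_ne.mpr (fun hh => hx hh.symm)
      simp [List.find?, hx, hdx]
  · have hp2 : p.2 ≠ d := h p (List.mem_of_find?_eq_some hf)
    rw [List.find?_append, hf]
    simp [hp2]

theorem pvMapStep (f h : Char → Char) (g : Char → Char) (H : ∀ x, f (g x) = h x) (l : List Char) :
    (l.map g).map f = l.map h := by
  rw [List.map_map]; exact List.map_congr_left fun a _ => H a

theorem convert_numbers_to_kurdish_spec : Claim_equal_convert_numbers_to_kurdish := by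
  intro text _
  unfold Spec_convert_numbers_to_kurdish convert_numbers_to_kurdish convert_numbers_to_kurdish_alt
  have hitems : pvAMap.items = [("0", "٠"), ("1", "١"), ("2", "٢"), ("3", "٣"), ("4", "٤"),
      ("5", "٥"), ("6", "٦"), ("7", "٧"), ("8", "٨"), ("9", "٩")] := by decide
  rw [hitems]
  have h0 : ∀ l : List Char, PySem.Str.replace (String.ofList l) "0" "٠" = String.ofList (l.map (fun x => if x = '0' then '٠' else x)) := step_single '0' '٠' _ _ (by decide) (by decide)
  have h1 : ∀ l : List Char, PySem.Str.replace (String.ofList l) "1" "١" = String.ofList (l.map (fun x => if x = '1' then '١' else x)) := step_single '1' '١' _ _ (by decide) (by decide)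
  have h2 : ∀ l : List Char, PySem.Str.replace (String.ofList l) "2" "٢" = String.ofList (l.map (fun x => if x = '2' then '٢' else x)) := step_single '2' '٢' _ _ (by decide) (by decide)
  have h3 : ∀ l : List Char, PySem.Str.replace (String.ofList l) "3" "٣" = String.ofList (l.map (fun x => if x = '3' then '٣' else x)) := step_single '3' '٣' _ _ (by decide) (by decide)
  have h4 : ∀ l : List Char, PySem.Str.replace (String.ofList l) "4" "٤" = String.ofList (l.map (fun x => if x = '4' then '٤' else x)) := step_single '4' '٤' _ _ (by decide) (by decide)
  have h5 : ∀ l : List Char, PySem.Str.replace (String.ofList l) "5" "٥" = String.ofList (l.map (fun x => if x = '5' then '٥' else x)) := step_single '5' '٥' _ _ (by decide) (by decide)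
  have h6 : ∀ l : List Char, PySem.Str.replace (String.ofList l) "6" "٦" = String.ofList (l.map (fun x => if x = '6' then '٦' else x)) := step_single '6' '٦' _ _ (by decide) (by decide)
  have h7 : ∀ l : List Char, PySem.Str.replace (String.ofList l) "7" "٧" = String.ofList (l.map (fun x => if x = '7' then '٧' else x)) := step_single '7' '٧' _ _ (by decide) (by decide)
  have h8 : ∀ l : List Char, PySem.Str.replace (String.ofList l) "8" "٨" = String.ofList (l.map (fun x => if x = '8' then '٨' else x)) := step_single '8' '٨' _ _ (by decide) (by decide)
  have h9 : ∀ l : List Char, PySem.Str.replace (String.ofList l) "9" "٩" = String.ofList (l.map (fun x => if x = '9' then '٩' else x)) := step_single '9' '٩' _ _ (by decide) (by decide)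
  rw [show text = String.ofList text.toList from String.ofList_toList.symm]
  simp only [List.foldl_cons, List.foldl_nil, h0, h1, h2, h3, h4, h5, h6, h7, h8, h9,
    String.toList_ofList]
  have M0 : ∀ l : List Char, l.map (fun x => if x = '0' then '٠' else x) = l.map (pvLookup [('0', '٠')]) :=
    fun l => List.map_congr_left (fun a _ => by
      simpa [pvLookup] using pvStep [] '0' '٠' (by simp) a)
  have M1 : ∀ l : List Char, (l.map (pvLookup [('0', '٠')])).map (fun x => if x = '1' then '١' else x) = l.map (pvLookup [('0', '٠'), ('1', '١')]) :=
    fun l => pvMapStep _ _ _ (pvStep [('0', '٠')] '1' '١' (by decide)) l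
  have M2 : ∀ l : List Char, (l.map (pvLookup [('0', '٠'), ('1', '١')])).map (fun x => if x = '2' then '٢' else x) = l.map (pvLookup [('0', '٠'), ('1', '١'), ('2', '٢')]) :=
    fun l => pvMapStep _ _ _ (pvStep [('0', '٠'), ('1', '١')] '2' '٢' (by decide)) l
  have M3 : ∀ l : List Char, (l.map (pvLookup [('0', '٠'), ('1', '١'), ('2', '٢')])).map (fun x => if x = '3' then '٣' else x) = l.map (pvLookup [('0', '٠'), ('1', '١'), ('2', '٢'), ('3', '٣')]) :=
    fun l => pvMapStep _ _ _ (pvStep [('0', '٠'), ('1', '١'), ('2', '٢')] '3' '٣' (by decide)) l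
  have M4 : ∀ l : List Char, (l.map (pvLookup [('0', '٠'), ('1', '١'), ('2', '٢'), ('3', '٣')])).map (fun x => if x = '4' then '٤' else x) = l.map (pvLookup [('0', '٠'), ('1', '١'), ('2', '٢'), ('3', '٣'), ('4', '٤')]) :=
    fun l => pvMapStep _ _ _ (pvStep [('0', '٠'), ('1', '١'), ('2', '٢'), ('3', '٣')] '4' '٤' (by decide)) l
  have M5 : ∀ l : List Char, (l.map (pvLookup [('0', '٠'), ('1', '١'), ('2', '٢'), ('3', '٣'), ('4', '٤')])).map (fun x => if x = '5' then '٥' else x) = l.map (pvLookup [('0', '٠'), ('1', '١'), ('2', '٢'), ('3', '٣'), ('4', '٤'), ('5', '٥')]) :=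
    fun l => pvMapStep _ _ _ (pvStep [('0', '٠'), ('1', '١'), ('2', '٢'), ('3', '٣'), ('4', '٤')] '5' '٥' (by decide)) l
  have M6 : ∀ l : List Char, (l.map (pvLookup [('0', '٠'), ('1', '١'), ('2', '٢'), ('3', '٣'), ('4', '٤'), ('5', '٥')])).map (fun x => if x = '6' then '٦' else x) = l.map (pvLookup [('0', '٠'), ('1', '١'), ('2', '٢'), ('3', '٣'), ('4', '٤'), ('5', '٥'), ('6', '٦')]) :=
    fun l => pvMapStep _ _ _ (pvStep [('0', '٠'), ('1', '١'), ('2', '٢'), ('3', '٣'), ('4', '٤'), ('5', '٥')] '6' '٦' (by decide)) l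
  have M7 : ∀ l : List Char, (l.map (pvLookup [('0', '٠'), ('1', '١'), ('2', '٢'), ('3', '٣'), ('4', '٤'), ('5', '٥'), ('6', '٦')])).map (fun x => if x = '7' then '٧' else x) = l.map (pvLookup [('0', '٠'), ('1', '١'), ('2', '٢'), ('3', '٣'), ('4', '٤'), ('5', '٥'), ('6', '٦'), ('7', '٧')]) :=
    fun l => pvMapStep _ _ _ (pvStep [('0', '٠'), ('1', '١'), ('2', '٢'), ('3', '٣'), ('4', '٤'), ('5', '٥'), ('6', '٦')] '7' '٧' (by decide)) l
  have M8 : ∀ l : List Char, (l.map (pvLookup [('0', '٠'), ('1', '١'), ('2', '٢'), ('3', '٣'), ('4', '٤'), ('5', '٥'), ('6', '٦'), ('7', '٧')])).map (fun x => if x = '8' then '٨' else x) = l.map (pvLookup [('0', '٠'), ('1', '١'), ('2', '٢'), ('3', '٣'), ('4', '٤'), ('5', '٥'), ('6', '٦'), ('7', '٧'), ('8', '٨')]) :=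
    fun l => pvMapStep _ _ _ (pvStep [('0', '٠'), ('1', '١'), ('2', '٢'), ('3', '٣'), ('4', '٤'), ('5', '٥'), ('6', '٦'), ('7', '٧')] '8' '٨' (by decide)) l
  have M9 : ∀ l : List Char, (l.map (pvLookup [('0', '٠'), ('1', '١'), ('2', '٢'), ('3', '٣'), ('4', '٤'), ('5', '٥'), ('6', '٦'), ('7', '٧'), ('8', '٨')])).map (fun x => if x = '9' then '٩' else x) = l.map (pvLookup [('0', '٠'), ('1', '١'), ('2', '٢'), ('3', '٣'), ('4', '٤'), ('5', '٥'), ('6', '٦'), ('7', '٧'), ('8', '٨'), ('9', '٩')]) :=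
    fun l => pvMapStep _ _ _ (pvStep [('0', '٠'), ('1', '١'), ('2', '٢'), ('3', '٣'), ('4', '٤'), ('5', '٥'), ('6', '٦'), ('7', '٧'), ('8', '٨')] '9' '٩' (by decide)) l
  rw [M0, M1, M2, M3, M4, M5, M6, M7, M8, M9]
  refine congrArg String.ofList (List.map_congr_left fun ch _ => ?_)
  have hb : pvBMap = PySem.Dict.mk [('0', '٠'), ('1', '١'), ('2', '٢'), ('3', '٣'), ('4', '٤'), ('5', '٥'), ('6', '٦'), ('7', '٧'), ('8', '٨'), ('9', '٩')] := by decide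
  rw [hb]
  rfl
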